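-- pv_equiv track=rewrite | github.com/dinner-group/evcn | examples/trpcage/plot.py | make_save_steps
-- ===== SOURCE A (Python) =====
-- def make_save_steps(n):
--     out = []
--     k = 0
--     while True:
--         for a in [1, 2, 5]:
--             v = a * 10**k
--             if v > n:
--                 return out
--             out.append(v)
--         k += 1
-- ===== SOURCE B (Python) =====
-- def make_save_steps(n):
--     out = []
--     v, m = 1, 1
--     while v <= n:
--         out.append(v)
--         if m == 1:
--             v, m = v * 2, 2
--         elif m == 2:
--             v, m = v * 5 // 2, 5
--         else:
--             v, m = v * 2, 1
--     return out
-- ===== Notes on version B (the rewrite author's own statement) =====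
-- stated objective: alternative
-- what changed: Replaces the nested decade/mantissa loops that recompute a*10**k each step with a single flat while loop that maintains a running value v (and mantissa marker m) advanced by incremental multiplications, never computing a power.
import Mathlib
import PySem

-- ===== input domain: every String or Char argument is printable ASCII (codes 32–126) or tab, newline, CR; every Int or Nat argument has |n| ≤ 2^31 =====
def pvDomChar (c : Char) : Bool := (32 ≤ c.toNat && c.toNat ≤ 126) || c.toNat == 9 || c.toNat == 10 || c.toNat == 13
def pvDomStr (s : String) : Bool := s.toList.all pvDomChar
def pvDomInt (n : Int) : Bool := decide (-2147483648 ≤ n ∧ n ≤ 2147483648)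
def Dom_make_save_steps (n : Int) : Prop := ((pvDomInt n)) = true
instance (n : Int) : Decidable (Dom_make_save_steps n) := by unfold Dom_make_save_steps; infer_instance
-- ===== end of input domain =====

-- B replaces the nested decade/mantissa loops (which recompute a * 10**k at every step) with one
-- flat while loop advancing a running value v by incremental multiplications; same return value.

-- ===== PORT A =====
-- A's 'while True' over k, with the inner 'for a in [1, 2, 5]' unrolled in order: each pass
-- returns out at the first v > n, otherwise appends the three values and moves on to k + 1.
-- Termination: the next pass is entered only when 5 * 10^k ≤ n, so (n - 10^k).toNat decreases.
def msLoopA (n : Int) (k : Nat) (out : List Int) : List Int :=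
  if n < 1 * 10 ^ k then out
  else if n < 2 * 10 ^ k then out ++ [1 * 10 ^ k]
  else if n < 5 * 10 ^ k then out ++ [1 * 10 ^ k, 2 * 10 ^ k]
  else msLoopA n (k + 1) (out ++ [1 * 10 ^ k, 2 * 10 ^ k, 5 * 10 ^ k])
termination_by (n - 10 ^ k).toNat
decreasing_by
  have h1 : (1:Int) ≤ 10 ^ k := one_le_pow₀ (by norm_num)
  omega

def make_save_steps (n : Int) : List Int := msLoopA n 0 []

-- ===== PORT B =====
-- B's while loop over the state (v, m), appending v to out; v * 5 // 2 is Python's floor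
-- division (PySem.Int.floordiv).  The fuel argument only makes the loop total: along B's
-- run v starts at 1 and grows by at least 1 per step, so n.toNat + 1 steps always suffice
-- (proved by the lemmas below; on fuel exhaustion the accumulator is returned).
def msLoopB (fuel : Nat) (n v m : Int) (out : List Int) : List Int :=
  match fuel with
  | 0 => out
  | f + 1 =>
    if v ≤ n then
      if m = 1 then msLoopB f n (v * 2) 2 (out ++ [v])
      else if m = 2 then msLoopB f n (PySem.Int.floordiv (v * 5) 2) 5 (out ++ [v])
      else msLoopB f n (v * 2) 1 (out ++ [v])
    else out

def make_save_steps_alt (n : Int) : List Int := msLoopB (n.toNat + 1) n 1 1 []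

-- ===== PRECONDITION & SPEC =====
def Spec_make_save_steps (n : Int) (out : List Int) : Prop := out = make_save_steps_alt n
instance (n : Int) (out : List Int) : Decidable (Spec_make_save_steps n out) := by unfold Spec_make_save_steps; infer_instance

-- ===== CLAIM (what is proved, stated in full; the proofs are below) =====
def Claim_equal_make_save_steps : Prop := ∀ (n : Int), Dom_make_save_steps n → Spec_make_save_steps n (make_save_steps n)

-- ===== LEMMAS AND PROOFS =====

-- Once v has overtaken n, B's loop returns the accumulator whatever the fuel.
theorem msLoopB_stop (fuel : Nat) (n v m : Int) (out : List Int) (h : n < v) :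
    msLoopB fuel n v m out = out := by
  cases fuel with
  | zero => rfl
  | succ f => simp [msLoopB, not_le.mpr h]

-- One pass of A's outer loop (values 10^k, 2*10^k, 5*10^k) corresponds to three steps of B's
-- flat loop started at v = 10^k with m = 1, given enough fuel.
theorem msLoopA_eq_msLoopB (n : Int) (k : Nat) (out : List Int) :
    ∀ fuel : Nat, (n - 10 ^ k).toNat < fuel →
      msLoopA n k out = msLoopB fuel n (10 ^ k) 1 out := by
  fun_induction msLoopA n k out with
  | case1 k out hlt =>
    intro fuel _
    rw [msLoopB_stop fuel n _ 1 out (by omega)]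
  | case2 k out hge hlt =>
    intro fuel hfuel
    have h1 : (1:Int) ≤ 10 ^ k := one_le_pow₀ (by norm_num)
    obtain ⟨f1, rfl⟩ : ∃ f, fuel = f + 1 := ⟨fuel - 1, by omega⟩
    simp only [msLoopB, if_pos (show (10:Int) ^ k ≤ n by omega)]
    rw [msLoopB_stop f1 n _ 2 _ (by omega)]
    norm_num
  | case3 k out hge1 hge2 hlt =>
    intro fuel hfuel
    have h1 : (1:Int) ≤ 10 ^ k := one_le_pow₀ (by norm_num)
    obtain ⟨f1, rfl⟩ : ∃ f, fuel = f + 1 := ⟨fuel - 1, by omega⟩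
    obtain ⟨f2, rfl⟩ : ∃ f, f1 = f + 1 := ⟨f1 - 1, by omega⟩
    simp only [msLoopB, if_pos (show (10:Int) ^ k ≤ n by omega),
      if_pos (show (10:Int) ^ k * 2 ≤ n by omega),
      if_neg (show ¬ (2:Int) = 1 by norm_num)]
    have hfd : PySem.Int.floordiv (10 ^ k * 2 * 5) 2 = 5 * 10 ^ k := by
      rw [PySem.Int.floordiv_eq_ediv_of_pos (by norm_num)]
      omega
    rw [hfd, msLoopB_stop f2 n _ 5 _ (by omega)]
    ring_nf
    simp
  | case4 k out hge1 hge2 hge3 ih =>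
    intro fuel hfuel
    have h1 : (1:Int) ≤ 10 ^ k := one_le_pow₀ (by norm_num)
    have h2 : (10:Int) ^ (k + 1) = 10 * 10 ^ k := by ring
    obtain ⟨f1, rfl⟩ : ∃ f, fuel = f + 1 := ⟨fuel - 1, by omega⟩
    obtain ⟨f2, rfl⟩ : ∃ f, f1 = f + 1 := ⟨f1 - 1, by omega⟩
    obtain ⟨f3, rfl⟩ : ∃ f, f2 = f + 1 := ⟨f2 - 1, by omega⟩
    simp only [msLoopB, if_pos (show (10:Int) ^ k ≤ n by omega),
      if_pos (show (10:Int) ^ k * 2 ≤ n by omega),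
      if_neg (show ¬ (2:Int) = 1 by norm_num)]
    have hfd : PySem.Int.floordiv (10 ^ k * 2 * 5) 2 = 5 * 10 ^ k := by
      rw [PySem.Int.floordiv_eq_ediv_of_pos (by norm_num)]
      omega
    rw [hfd]
    simp only [if_pos (show (5:Int) * 10 ^ k ≤ n by omega),
      if_neg (show ¬ (5:Int) = 1 by norm_num), if_neg (show ¬ (5:Int) = 2 by norm_num)]
    have := ih f3 (by omega)
    rw [this, h2]
    ring_nf
    simp

-- ===== VERDICT (by name: the statement is the Claim_ definition above) =====
theorem make_save_steps_spec : Claim_equal_make_save_steps := by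
  intro n _
  unfold Spec_make_save_steps make_save_steps make_save_steps_alt
  have := msLoopA_eq_msLoopB n 0 [] (n.toNat + 1) (by omega)
  simpa using this
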